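-- pv_equiv track=rewrite | github.com/gorsestarrr/advent-of-code | 2015/python/day_05.py | part2
-- ===== SOURCE A (Python) =====
-- def has_non_overlapping_pair(s: str) -> bool:
--     for i in range(len(s) - 1):
--         pair = s[i:i+2]
--         if pair in s[i+2:]:
--             return True
--     return False
--
-- def has_repeat_with_one_between(s: str) -> bool:
--     for i in range(len(s) - 2):
--         if s[i] == s[i + 2]:
--             return True
--     return False
--
-- def part2(lines):
--     count = 0
--     for line in lines:
--         if not has_non_overlapping_pair(line):
--             continue
--         if has_repeat_with_one_between(line):
--             count += 1
--
--     return count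
-- ===== SOURCE B (Python) =====
-- def part2(lines):
--     # one fused pass per line: a set of pairs seen at least two positions back,
--     # with the sandwiched-repeat check in the same loop
--     count = 0
--     for line in lines:
--         n = len(line)
--         seen = set()
--         pair_ok = False
--         sandwich = False
--         for j in range(n - 1):
--             if j >= 2:
--                 seen.add(line[j-2:j])
--             if line[j:j+2] in seen:
--                 pair_ok = True
--             if j + 2 < n and line[j] == line[j+2]:
--                 sandwich = True
--         if pair_ok and sandwich:
--             count += 1
--     return count
-- ===== Notes on version B (the rewrite author's own statement) =====
-- stated objective: alternative
-- what changed: Replaces A's per-index slice-and-substring search over the rest of the line with a single fused pass per line that keeps a set of pairs seen at least two positions earlier and checks the sandwiched repeat in the same loop.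
import Mathlib
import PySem

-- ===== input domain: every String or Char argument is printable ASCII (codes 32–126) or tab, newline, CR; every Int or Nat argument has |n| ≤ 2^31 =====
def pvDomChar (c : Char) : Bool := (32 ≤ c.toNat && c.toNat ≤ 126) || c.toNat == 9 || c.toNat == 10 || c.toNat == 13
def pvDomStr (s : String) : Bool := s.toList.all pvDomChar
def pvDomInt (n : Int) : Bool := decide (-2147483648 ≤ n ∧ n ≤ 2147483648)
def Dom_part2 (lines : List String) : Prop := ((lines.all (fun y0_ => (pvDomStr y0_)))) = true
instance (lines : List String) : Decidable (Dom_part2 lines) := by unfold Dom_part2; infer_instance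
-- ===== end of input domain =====

-- B replaces A's per-index slice-and-substring search over the rest of the line with one fused
-- pass per line keeping a set of pairs seen ≥ 2 positions earlier (objective: alternative).

-- ===== PORT A =====
-- has_non_overlapping_pair: early-return for-loop = List.any over the range
def pvHasPairA (s : List Char) : Bool :=
  (PySem.List.pyRange 0 ((s.length : Int) - 1) 1).any fun i =>
    PySem.Chars.isIn (PySem.List.slice s (some i) (some (i + 2)))
      (PySem.List.slice s (some (i + 2)) none)

-- has_repeat_with_one_between (indices are in range, so pyGetD's default is never used)
def pvHasRepA (s : List Char) : Bool :=
  (PySem.List.pyRange 0 ((s.length : Int) - 2) 1).any fun i =>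
    PySem.List.pyGetD s i ' ' == PySem.List.pyGetD s (i + 2) ' '

def part2 (lines : List String) : Int :=
  lines.foldl (fun count line =>
    if !pvHasPairA line.toList then count
    else if pvHasRepA line.toList then count + 1 else count) 0

-- ===== PORT B =====
-- one loop step of Source B's fused pass: state = (seen, pair_ok, sandwich)
def pvStepB (s : List Char) (st : PySem.Set (List Char) × Bool × Bool) (j : Int) :
    PySem.Set (List Char) × Bool × Bool :=
  let seen := if 2 ≤ j then PySem.Set.add st.1 (PySem.List.slice s (some (j - 2)) (some j)) else st.1
  let pairOk := st.2.1 || PySem.Set.contains seen (PySem.List.slice s (some j) (some (j + 2)))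
  let sand := st.2.2 ||
    (decide (j + 2 < (s.length : Int)) && (PySem.List.pyGetD s j ' ' == PySem.List.pyGetD s (j + 2) ' '))
  (seen, pairOk, sand)

def pvLineB (s : List Char) : Bool :=
  let st := (PySem.List.pyRange 0 ((s.length : Int) - 1) 1).foldl (pvStepB s)
    (PySem.Set.empty, false, false)
  st.2.1 && st.2.2

def part2_alt (lines : List String) : Int :=
  lines.foldl (fun count line => if pvLineB line.toList then count + 1 else count) 0

-- ===== PRECONDITION & SPEC =====
def Spec_part2 (lines : List String) (out : Int) : Prop := out = part2_alt lines
instance (lines : List String) (out : Int) : Decidable (Spec_part2 lines out) := by unfold Spec_part2; infer_instance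

-- ===== CLAIM (what is proved, stated in full; the proofs are below) =====
def Claim_equal_part2 : Prop := ∀ (lines : List String), Dom_part2 lines → Spec_part2 lines (part2 lines)

-- ===== LEMMAS AND PROOFS =====

-- the two-character window starting at i
def pvPr (s : List Char) (i : Nat) : List Char := (s.drop i).take 2

lemma pvPr_len {s : List Char} {i : Nat} (h : i + 1 < s.length) : (pvPr s i).length = 2 := by
  simp [pvPr]; omega

-- pvPr i is a prefix of s.drop m  ↔  the windows at i and m coincide (and m fits)
lemma pvPr_prefix_iff {s : List Char} {i : Nat} (m : Nat) (hi : i + 1 < s.length) :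
    pvPr s i <+: s.drop m ↔ (m + 1 < s.length ∧ pvPr s i = pvPr s m) := by
  rw [List.prefix_iff_eq_take, pvPr_len hi]
  constructor
  · intro h
    refine ⟨?_, h⟩
    have h2 : (pvPr s i).length = 2 := pvPr_len hi
    rw [h] at h2
    simp at h2
    omega
  · exact fun h => h.2

lemma pvSlice_pair (s : List Char) (k : Nat) :
    PySem.List.slice s (some (k : Int)) (some ((k : Int) + 2)) = pvPr s k := by
  have : ((k : Int) + 2) = ((k + 2 : Nat) : Int) := by push_cast; ring
  rw [this, PySem.List.slice_natCast]
  simp [pvPr]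

lemma pvSlice_tail (s : List Char) (k : Nat) :
    PySem.List.slice s (some ((k : Int) + 2)) none = s.drop (k + 2) := by
  have : ((k : Int) + 2) = ((k + 2 : Nat) : Int) := by push_cast; ring
  rw [this, PySem.List.slice_from_natCast]

lemma pvGetD_shift (s : List Char) (k : Nat) :
    PySem.List.pyGetD s ((k : Int) + 2) ' ' = s.getD (k + 2) ' ' := by
  have : ((k : Int) + 2) = ((k + 2 : Nat) : Int) := by push_cast; ring
  rw [this, PySem.List.pyGetD_natCast]

-- the common characterisation of the "non-overlapping duplicate pair" condition
def pvQpair (s : List Char) : Prop :=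
  ∃ i m : Nat, i + 2 ≤ m ∧ m + 1 < s.length ∧ pvPr s i = pvPr s m

lemma pvHasPairA_iff (s : List Char) : pvHasPairA s = true ↔ pvQpair s := by
  unfold pvHasPairA
  rw [PySem.List.pyRange_one]
  simp only [List.any_map, List.any_eq_true, List.mem_range, Function.comp, zero_add,
    pvSlice_pair, pvSlice_tail]
  constructor
  · rintro ⟨k, hk, he⟩
    have hk1 : k + 1 < s.length := by omega
    obtain ⟨j, hp⟩ := (PySem.Chars.exists_prefix_drop_iff_isIn _ _).mpr he
    rw [List.drop_drop] at hp
    rw [pvPr_prefix_iff (k + 2 + j) hk1] at hp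
    exact ⟨k, k + 2 + j, by omega, hp.1, hp.2⟩
  · rintro ⟨i, m, him, hm, he⟩
    refine ⟨i, by omega, ?_⟩
    rw [← PySem.Chars.exists_prefix_drop_iff_isIn]
    refine ⟨m - (i + 2), ?_⟩
    rw [List.drop_drop]
    have : i + 2 + (m - (i + 2)) = m := by omega
    rw [this, pvPr_prefix_iff m (by omega)]
    exact ⟨hm, he⟩

lemma pvHasRepA_iff (s : List Char) :
    pvHasRepA s = true ↔ ∃ i, i + 2 < s.length ∧ s.getD i ' ' = s.getD (i + 2) ' ' := by
  unfold pvHasRepA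
  rw [PySem.List.pyRange_one]
  simp only [List.any_map, List.any_eq_true, List.mem_range, Function.comp, zero_add, beq_iff_eq,
    pvGetD_shift, PySem.List.pyGetD_natCast]
  constructor
  · rintro ⟨k, hk, he⟩
    exact ⟨k, by omega, he⟩
  · rintro ⟨k, hk, he⟩
    exact ⟨k, by omega, he⟩

-- B-side loop invariant: after the steps 0 … j-1, 'seen' holds exactly the windows that start
-- at least two positions before j, and the two flags are set iff a witness below j exists
lemma pvFoldB_inv (s : List Char) (j : Nat) :
    (∀ p, p ∈ ((List.range j).foldl (fun st (k : Nat) => pvStepB s st (k : Int))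
        (PySem.Set.empty, false, false)).1 ↔ ∃ i, i + 2 < j ∧ p = pvPr s i) ∧
    (((List.range j).foldl (fun st (k : Nat) => pvStepB s st (k : Int))
        (PySem.Set.empty, false, false)).2.1 = true ↔
      ∃ i m, i + 2 ≤ m ∧ m < j ∧ pvPr s i = pvPr s m) ∧
    (((List.range j).foldl (fun st (k : Nat) => pvStepB s st (k : Int))
        (PySem.Set.empty, false, false)).2.2 = true ↔
      ∃ i, i < j ∧ i + 2 < s.length ∧ s.getD i ' ' = s.getD (i + 2) ' ') := by
  induction j with
  | zero =>
    refine ⟨?_, ?_, ?_⟩ <;> simp [PySem.Set.empty]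
  | succ j ih =>
    obtain ⟨ih1, ih2, ih3⟩ := ih
    rw [List.range_succ, List.foldl_append, List.foldl_cons, List.foldl_nil]
    set st := (List.range j).foldl (fun st (k : Nat) => pvStepB s st (k : Int))
      ((PySem.Set.empty : PySem.Set (List Char)), false, false) with hst
    have hseen : ∀ p, p ∈ (pvStepB s st (j : Int)).1 ↔ ∃ i, i + 2 < j + 1 ∧ p = pvPr s i := by
      intro p
      show p ∈ (if (2:Int) ≤ (j:Int) then PySem.Set.add st.1 _ else st.1) ↔ _
      by_cases h2 : 2 ≤ j
      · rw [if_pos (by exact_mod_cast h2)]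
        have e1 : ((j : Int) - 2) = ((j - 2 : Nat) : Int) := by
          rw [Nat.cast_sub h2]; norm_num
        rw [e1, PySem.List.slice_natCast, PySem.Set.mem_add]
        have e2 : List.take (j - (j - 2)) (List.drop (j - 2) s) = pvPr s (j - 2) := by
          have : j - (j - 2) = 2 := by omega
          rw [this]; rfl
        rw [e2, ih1 p]
        constructor
        · rintro (⟨i, hi, hp⟩ | hp)
          · exact ⟨i, by omega, hp⟩
          · exact ⟨j - 2, by omega, hp⟩
        · rintro ⟨i, hi, hp⟩
          by_cases hij : i + 2 < j
          · exact Or.inl ⟨i, hij, hp⟩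
          · have : i = j - 2 := by omega
            exact Or.inr (this ▸ hp)
      · rw [if_neg (by exact_mod_cast h2)]
        rw [ih1 p]
        constructor
        · rintro ⟨i, hi, hp⟩; exact ⟨i, by omega, hp⟩
        · rintro ⟨i, hi, hp⟩
          exact absurd hi (by omega)
    refine ⟨hseen, ?_, ?_⟩
    · show (st.2.1 || PySem.Set.contains (pvStepB s st (j:Int)).1
        (PySem.List.slice s (some (j:Int)) (some ((j:Int) + 2)))) = true ↔ _
      rw [pvSlice_pair, Bool.or_eq_true, ih2]
      have hc : PySem.Set.contains (pvStepB s st (j:Int)).1 (pvPr s j) = true ↔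
          pvPr s j ∈ (pvStepB s st (j:Int)).1 := by
        simp [PySem.Set.contains]
      rw [hc, hseen]
      constructor
      · rintro (⟨i, m, him, hm, he⟩ | ⟨i, hi, hp⟩)
        · exact ⟨i, m, him, by omega, he⟩
        · exact ⟨i, j, by omega, by omega, hp.symm⟩
      · rintro ⟨i, m, him, hm, he⟩
        by_cases hmj : m < j
        · exact Or.inl ⟨i, m, him, hmj, he⟩
        · have : m = j := by omega
          subst this
          exact Or.inr ⟨i, by omega, he.symm⟩
    · show (st.2.2 || (decide ((j:Int) + 2 < (s.length : Int)) &&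
        (PySem.List.pyGetD s (j:Int) ' ' == PySem.List.pyGetD s ((j:Int) + 2) ' '))) = true ↔ _
      rw [Bool.or_eq_true, ih3, pvGetD_shift, PySem.List.pyGetD_natCast]
      simp only [Bool.and_eq_true, decide_eq_true_eq, beq_iff_eq]
      constructor
      · rintro (⟨i, hi, hl, he⟩ | ⟨hl, he⟩)
        · exact ⟨i, by omega, hl, he⟩
        · exact ⟨j, by omega, by exact_mod_cast hl, he⟩
      · rintro ⟨i, hi, hl, he⟩
        by_cases hij : i < j
        · exact Or.inl ⟨i, hij, hl, he⟩
        · have : i = j := by omega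
          subst this
          exact Or.inr ⟨by exact_mod_cast hl, he⟩

lemma pvLineB_iff (s : List Char) :
    pvLineB s = true ↔ (pvQpair s ∧ ∃ i, i + 2 < s.length ∧ s.getD i ' ' = s.getD (i + 2) ' ') := by
  unfold pvLineB
  rw [PySem.List.pyRange_one]
  have e : ((s.length : Int) - 1 - 0).toNat = s.length - 1 := by omega
  rw [e, List.foldl_map]
  clear e
  simp only [zero_add]
  obtain ⟨h1, h2, h3⟩ := pvFoldB_inv s (s.length - 1)
  rw [Bool.and_eq_true, h2, h3]
  unfold pvQpair
  constructor
  · rintro ⟨⟨i, m, him, hm, he⟩, ⟨i2, hi2, hl, hee⟩⟩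
    exact ⟨⟨i, m, him, by omega, he⟩, ⟨i2, hl, hee⟩⟩
  · rintro ⟨⟨i, m, him, hm, he⟩, ⟨i2, hl, hee⟩⟩
    exact ⟨⟨i, m, him, by omega, he⟩, ⟨i2, by omega, hl, hee⟩⟩

lemma pvLineB_eq (s : List Char) : pvLineB s = (pvHasPairA s && pvHasRepA s) := by
  by_cases h : pvLineB s = true
  · have := (pvLineB_iff s).mp h
    rw [h]
    symm
    simp only [Bool.and_eq_true]
    exact ⟨(pvHasPairA_iff s).mpr this.1, (pvHasRepA_iff s).mpr this.2⟩
  · rw [Bool.not_eq_true] at h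
    rw [h]
    symm
    rw [Bool.and_eq_false_iff]
    by_contra hc
    push_neg at hc
    have h1 : pvHasPairA s = true := by
      cases hb : pvHasPairA s with
      | false => exact absurd hb hc.1
      | true => rfl
    have h2 : pvHasRepA s = true := by
      cases hb : pvHasRepA s with
      | false => exact absurd hb hc.2
      | true => rfl
    have : pvLineB s = true :=
      (pvLineB_iff s).mpr ⟨(pvHasPairA_iff s).mp h1, (pvHasRepA_iff s).mp h2⟩
    simp [this] at h

-- ===== VERDICT (by name: the statement is the Claim_ definition above) =====
theorem part2_spec : Claim_equal_part2 := by
  intro lines _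
  unfold Spec_part2 part2 part2_alt
  apply PySem.List.foldl_congr_mem
  intro acc line _
  rw [pvLineB_eq]
  by_cases h1 : pvHasPairA line.toList <;> by_cases h2 : pvHasRepA line.toList <;>
    simp [h1, h2]
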